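-- pv_equiv track=rewrite | github.com/mcoot/AdventOfCode2016 | day6.py | least_frequent
-- ===== SOURCE A (Python) =====
-- from math import inf
--
-- def count_frequencies(l):
--     seen = {}
--     for element in l:
--         seen[element] = seen.get(element, 0) + 1
--     return seen
--
-- def least_frequent(l):
--     seen = count_frequencies(l)
--
--     mf = None
--     mval = inf
--     for key in seen:
--         if seen[key] < mval:
--             mf = key
--             mval = seen[key]
--
--     return mf
-- ===== SOURCE B (Python) =====
-- def least_frequent(l):
--     if not l:
--         return None
--     return min(l, key=l.count)
-- ===== Notes on version B (the rewrite author's own statement) =====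
-- stated objective: idiomatic
-- what changed: Replaced the frequency-dict build plus manual keys scan with an empty guard and a direct min(l, key=l.count) over the list itself.
import Mathlib
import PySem

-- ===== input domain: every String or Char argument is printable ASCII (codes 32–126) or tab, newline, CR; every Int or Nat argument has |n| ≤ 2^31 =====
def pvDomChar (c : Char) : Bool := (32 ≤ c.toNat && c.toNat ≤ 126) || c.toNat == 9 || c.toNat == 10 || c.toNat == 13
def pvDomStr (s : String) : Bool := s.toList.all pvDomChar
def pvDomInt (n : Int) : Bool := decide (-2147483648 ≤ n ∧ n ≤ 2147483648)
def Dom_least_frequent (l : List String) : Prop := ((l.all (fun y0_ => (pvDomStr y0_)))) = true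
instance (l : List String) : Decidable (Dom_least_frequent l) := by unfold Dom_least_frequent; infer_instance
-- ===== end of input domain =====

-- B replaces the frequency-dict build plus manual scan with a direct min over the list keyed by count (idiomatic, same return value).

-- ===== PORT A =====
def count_frequencies (l : List String) : PySem.Dict String Int :=
  l.foldl (fun d x => d.insert x (d.getD x 0 + 1)) PySem.Dict.empty

-- mval starts at inf: modelled as Option Int with none = inf (any int < inf). seen[key] is
-- ported as getD seen key 0; every key iterated over is present, so this is exact.
def least_frequent (l : List String) : Option String :=
  let seen := count_frequencies l
  (seen.keys.foldl
    (fun st key =>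
      match st.2 with
      | none => (some key, some (seen.getD key 0))
      | some m => if seen.getD key 0 < m then (some key, some (seen.getD key 0)) else st)
    ((none, none) : Option String × Option Int)).1

-- ===== PORT B =====
def least_frequent_alt (l : List String) : Option String :=
  match l with
  | [] => none
  | _ => PySem.List.min? l (fun x => (l.count x : Int))

-- ===== PRECONDITION & SPEC =====
def Spec_least_frequent (l : List String) (out : Option String) : Prop := out = least_frequent_alt l
instance (l : List String) (out : Option String) : Decidable (Spec_least_frequent l out) := by unfold Spec_least_frequent; infer_instance

-- ===== CLAIM (what is proved, stated in full; the proofs are below) =====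
def Claim_equal_least_frequent : Prop := ∀ (l : List String), Dom_least_frequent l → Spec_least_frequent l (least_frequent l)

-- ===== LEMMAS AND PROOFS =====

-- the min?-style step, as a named function for the proofs
def pvStep (g : String → Int) (a : Option String) (k : String) : Option String :=
  match a with
  | none => some k
  | some m => if g k < g m then some k else some m

lemma min?_eq_foldl_pvStep (g : String → Int) (xs : List String) :
    PySem.List.min? xs g = xs.foldl (pvStep g) none := by
  unfold PySem.List.min?
  congr 1
  funext acc k
  cases acc <;> simp [pvStep]

-- A's (mf, mval) loop computes the same first-min as the plain min? fold
lemma foldA_eq_foldMin (g : String → Int) (ks : List String) (acc : Option String) :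
    (ks.foldl
      (fun st key =>
        match st.2 with
        | none => (some key, some (g key))
        | some m => if g key < m then (some key, some (g key)) else st)
      (acc, acc.map g)).1
    = ks.foldl (pvStep g) acc := by
  induction ks generalizing acc with
  | nil => rfl
  | cons x t ih =>
    cases acc with
    | none =>
      simpa [pvStep] using ih (some x)
    | some m =>
      by_cases h : g x < g m
      · simpa [pvStep, h] using ih (some x)
      · simpa [pvStep, h] using ih (some m)

-- folding the min? step over the deduplicated list gives min? of the original list
lemma foldMin_ofList (g : String → Int) (xs : List String) : ∀ (s : List String),
    PySem.List.min? (xs.foldl PySem.Set.add s) g = xs.foldl (pvStep g) (PySem.List.min? s g) := by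
  induction xs with
  | nil => intro s; rfl
  | cons x t ih =>
    intro s
    by_cases hx : x ∈ s
    · have hadd : PySem.Set.add s x = s := by
        simp [PySem.Set.add, PySem.Set.contains, hx]
      have hskip : pvStep g (PySem.List.min? s g) x = PySem.List.min? s g := by
        obtain ⟨m, hm⟩ : ∃ m, PySem.List.min? s g = some m := by
          cases hmin : PySem.List.min? s g with
          | none =>
            rw [PySem.List.min?_eq_none_iff] at hmin
            subst hmin; cases hx
          | some m => exact ⟨m, rfl⟩
        have hle : g m ≤ g x := PySem.List.min?_isMin hm x hx
        simp [pvStep, hm, not_lt.mpr hle]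
      simp only [List.foldl_cons, hadd, hskip, ih]
    · have hadd : PySem.Set.add s x = s ++ [x] := by
        simp [PySem.Set.add, PySem.Set.contains, hx]
      have happ : PySem.List.min? (s ++ [x]) g = pvStep g (PySem.List.min? s g) x := by
        simp [min?_eq_foldl_pvStep, List.foldl_append]
      simp only [List.foldl_cons, hadd, ih (s ++ [x]), happ]

lemma getD_count_frequencies (l : List String) (k : String) :
    (count_frequencies l).getD k 0 = (l.count k : Int) := by
  unfold count_frequencies
  rw [PySem.Dict.getD_foldl_insert_add_one]
  simp

lemma keys_count_frequencies (l : List String) :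
    (count_frequencies l).keys = l.foldl PySem.Set.add [] := by
  unfold count_frequencies
  rw [PySem.Dict.keys_foldl_insert]
  rfl

-- ===== VERDICT (by name: the statement is the Claim_ definition above) =====
theorem least_frequent_spec : Claim_equal_least_frequent := by
  intro l _
  unfold Spec_least_frequent
  cases l with
  | nil => rfl
  | cons a t =>
    show least_frequent (a :: t) = least_frequent_alt (a :: t)
    unfold least_frequent least_frequent_alt
    simp only [getD_count_frequencies, keys_count_frequencies]
    have h1 := foldA_eq_foldMin (fun k => (((a :: t).count k : Nat) : Int))
      ((a :: t).foldl PySem.Set.add []) none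
    have h2 := foldMin_ofList (fun k => (((a :: t).count k : Nat) : Int)) (a :: t) []
    calc _ = ((a :: t).foldl PySem.Set.add []).foldl
              (pvStep (fun k => (((a :: t).count k : Nat) : Int))) none := by simpa using h1
      _ = PySem.List.min? ((a :: t).foldl PySem.Set.add [])
              (fun k => (((a :: t).count k : Nat) : Int)) :=
            (min?_eq_foldl_pvStep _ _).symm
      _ = (a :: t).foldl (pvStep (fun k => (((a :: t).count k : Nat) : Int)))
              (PySem.List.min? [] (fun k => (((a :: t).count k : Nat) : Int))) := h2
      _ = PySem.List.min? (a :: t) (fun k => (((a :: t).count k : Nat) : Int)) := by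
            rw [min?_eq_foldl_pvStep (xs := a :: t), min?_eq_foldl_pvStep (xs := [])]
            rfl
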